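-- pv_equiv track=rewrite | github.com/vhmnguyen/vnexpressCrawl | frontQueries/getParentDirect.py | get_parent_directory
-- ===== SOURCE A (Python) =====
-- def get_parent_directory(url):
--     url_list_form = list(url)
--     url_list_to_return = []
--     count = 0
--     for character in url_list_form:
--         if character == '/':
--             count += 1
--         if count >= 2:
--             return ''.join(url_list_to_return)
--         else:
--             url_list_to_return.append(character)
--     return ''.join(url_list_to_return)
-- ===== SOURCE B (Python) =====
-- def get_parent_directory(url):
--     parts = url.split('/', 2)
--     return '/'.join(parts[:2])
-- ===== Notes on version B (the rewrite author's own statement) =====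
-- stated objective: idiomatic
-- what changed: Replaces the character-by-character scan with a slash counter and accumulator list by a single bounded split on the slash separator (maxsplit 2) and rejoining the first two tokens; no explicit loop or counter.
import Mathlib
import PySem

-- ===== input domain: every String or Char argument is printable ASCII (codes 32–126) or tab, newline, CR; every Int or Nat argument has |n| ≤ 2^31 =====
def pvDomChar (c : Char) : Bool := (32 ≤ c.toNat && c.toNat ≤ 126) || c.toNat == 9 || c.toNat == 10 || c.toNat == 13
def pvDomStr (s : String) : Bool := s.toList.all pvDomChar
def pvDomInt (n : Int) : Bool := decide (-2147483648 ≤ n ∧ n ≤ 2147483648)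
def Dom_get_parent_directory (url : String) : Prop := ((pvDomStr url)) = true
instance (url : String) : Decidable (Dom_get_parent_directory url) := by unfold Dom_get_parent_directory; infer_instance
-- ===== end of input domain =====

-- B replaces A's character scan with a slash counter by split('/', 2) + join of the first two tokens (idiomatic; same cost).

-- ===== PORT A =====
-- A's for-loop over list(url) with accumulator list and slash counter; early return when the counter reaches 2.
def getParentGoA : List Char → List Char → Nat → List Char
  | [], acc, _ => acc
  | c :: rest, acc, count =>
    let count' := if c == '/' then count + 1 else count
    if count' ≥ 2 then acc
    else getParentGoA rest (acc ++ [c]) count'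

def get_parent_directory (url : String) : String :=
  String.ofList (getParentGoA url.toList [] 0)

-- ===== PORT B =====
def get_parent_directory_alt (url : String) : String :=
  match PySem.Str.splitMax? url "/" 2 with
  | some parts => PySem.Str.join "/" (PySem.List.slice parts none (some 2))
  | none => ""   -- unreachable: the separator "/" is nonempty

-- ===== PRECONDITION & SPEC =====
def Spec_get_parent_directory (url : String) (out : String) : Prop := out = get_parent_directory_alt url
instance (url : String) (out : String) : Decidable (Spec_get_parent_directory url out) := by unfold Spec_get_parent_directory; infer_instance

-- ===== CLAIM =====
def Claim_equal_get_parent_directory : Prop := ∀ (url : String), Dom_get_parent_directory url → Spec_get_parent_directory url (get_parent_directory url)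

-- ===== LEMMAS AND PROOFS =====
-- Reference function: the prefix of cs up to (excluding) the (k+1)-st slash.
def pvPref : Nat → List Char → List Char
  | _, [] => []
  | k, c :: rest => if c = '/' then (if k = 0 then [] else '/' :: pvPref (k - 1) rest) else c :: pvPref k rest

theorem goA_eq_pref (l : List Char) : ∀ (acc : List Char) (count : Nat), count ≤ 1 →
    getParentGoA l acc count = acc ++ pvPref (1 - count) l := by
  induction l with
  | nil => intro acc count _; simp [getParentGoA, pvPref]
  | cons c rest ih =>
    intro acc count hc
    by_cases h : c = '/'
    · subst h
      interval_cases count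
      · simpa [getParentGoA, pvPref] using ih (acc ++ ['/']) 1 (by omega)
      · simp [getParentGoA, pvPref]
    · have hbe : (c == '/') = false := by simpa using h
      have : count < 2 := by omega
      simp only [getParentGoA, hbe, Bool.false_eq_true, if_false]
      rw [if_neg (by omega)]
      rw [ih (acc ++ [c]) count hc]
      simp [pvPref, h]

theorem goB_eq_pref (l : List Char) : ∀ (fuel : Nat) (cur : List Char), l.length ≤ fuel →
    (PySem.Chars.join ['/'] ((PySem.Chars.splitOnMax.go ['/'] fuel 2 l cur []).take 2)
        = cur.reverse ++ pvPref 1 l)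
    ∧ (∀ p, PySem.Chars.join ['/'] ((PySem.Chars.splitOnMax.go ['/'] fuel 1 l cur [p]).take 2)
        = p ++ '/' :: (cur.reverse ++ pvPref 0 l))
    ∧ (∀ p q, PySem.Chars.join ['/'] ((PySem.Chars.splitOnMax.go ['/'] fuel 0 l cur [q, p]).take 2)
        = p ++ '/' :: q) := by
  induction l with
  | nil =>
    intro fuel cur _
    cases fuel <;>
      simp [PySem.Chars.splitOnMax.go, PySem.Chars.join, pvPref, List.intercalate]
  | cons c rest ih =>
    intro fuel cur hf
    cases fuel with
    | zero => simp at hf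
    | succ fuel =>
      have hf' : rest.length ≤ fuel := by simpa using hf
      have hgo : ∀ (m : Nat) (acc : List (List Char)),
          PySem.Chars.splitOnMax.go ['/'] (fuel + 1) m (c :: rest) cur acc
            = if m = 0 then ((cur.reverse ++ c :: rest) :: acc).reverse
              else if (['/'] : List Char).isPrefixOf (c :: rest)
                then PySem.Chars.splitOnMax.go ['/'] fuel (m - 1)
                      (List.drop (['/'] : List Char).length (c :: rest)) [] (cur.reverse :: acc)
                else PySem.Chars.splitOnMax.go ['/'] fuel m rest (c :: cur) acc := by
        intro m acc; rfl
      by_cases h : c = '/'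
      · subst h
        have hpre : (['/'] : List Char).isPrefixOf ('/' :: rest) = true := by
          simp [List.isPrefixOf]
        refine ⟨?_, ?_, ?_⟩
        · rw [hgo, if_neg (by omega), if_pos hpre]
          simp only [List.length_cons, List.length_nil, List.drop_succ_cons, List.drop_zero, Nat.reduceSub]
          rw [(ih fuel [] hf').2.1 cur.reverse]
          simp [pvPref]
        · intro p
          rw [hgo, if_neg (by omega), if_pos hpre]
          simp only [List.length_cons, List.length_nil, List.drop_succ_cons, List.drop_zero, Nat.reduceSub]
          rw [(ih fuel [] hf').2.2 p cur.reverse]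
          simp [pvPref]
        · intro p q
          rw [hgo, if_pos rfl]
          simp [PySem.Chars.join, List.intercalate]
      · have hpre : (['/'] : List Char).isPrefixOf (c :: rest) = false := by
          simp [List.isPrefixOf]
          exact fun e => h e.symm
        refine ⟨?_, ?_, ?_⟩
        · rw [hgo, if_neg (by omega), hpre]
          simp only [Bool.false_eq_true, if_false]
          rw [(ih fuel (c :: cur) hf').1]
          simp [pvPref, h]
        · intro p
          rw [hgo, if_neg (by omega), hpre]
          simp only [Bool.false_eq_true, if_false]
          rw [(ih fuel (c :: cur) hf').2.1 p]
          simp [pvPref, h]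
        · intro p q
          rw [hgo, if_pos rfl]
          simp [PySem.Chars.join, List.intercalate]

theorem alt_eq_pref (url : String) :
    get_parent_directory_alt url = String.ofList (pvPref 1 url.toList) := by
  have hsplit : PySem.Chars.splitMax? url.toList ['/'] 2
      = some (PySem.Chars.splitOnMax.go ['/'] (url.toList.length + 1) 2 url.toList [] []) := by
    simp [PySem.Chars.splitMax?, PySem.Chars.splitOnMax]
  unfold get_parent_directory_alt PySem.Str.splitMax?
  have : ("/" : String).toList = ['/'] := by decide
  rw [this, hsplit]
  simp only [Option.map_some]
  have hslice : ∀ (xs : List String), PySem.List.slice xs none (some 2) = xs.take 2 := by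
    intro xs
    simpa using PySem.List.slice_to xs (by norm_num : (0:Int) ≤ 2)
  rw [hslice]
  unfold PySem.Str.join
  congr 1
  rw [show ("/" : String).toList = ['/'] from by decide]
  rw [← List.map_take, List.map_map]
  have : (String.toList ∘ String.ofList) = id := by
    funext l; simp [Function.comp]
  rw [this, List.map_id]
  exact (goB_eq_pref url.toList (url.toList.length + 1) [] (by omega)).1

-- ===== VERDICT =====
theorem get_parent_directory_spec : Claim_equal_get_parent_directory := by
  intro url _
  unfold Spec_get_parent_directory
  rw [alt_eq_pref]
  unfold get_parent_directory
  rw [goA_eq_pref url.toList [] 0 (by omega)]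
  simp
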